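-- pv_equiv track=rewrite | github.com/okinealb/aoc | day04/solution.py | part2
-- ===== SOURCE A (Python) =====
-- def part2(data):
--     """
--     Count the number of accessible cells in the grid, removing them and
--     re-evaluating until no more can be removed.
--     """
--
--     # Clean data
--     data = [line.strip() for line in data if line.strip()]
--
--     # Get dimensions
--     m = len(data)
--     n = len(data[0])
--
--     # Initialize count and stack
--     count = 0
--     stack = []
--
--     # Function to count accessible cells and add to the stack
--     # (nearly the same as part 1)
--     def count_accessible():
--         count = 0
--         for row in range(m):
--             for col in range(n):
--                 if data[row][col] != "@":
--                     continue
--                 total = 0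
--                 top = max(0, row - 1)
--                 bot = min(m, row + 2)
--                 lft = max(0, col - 1)
--                 rgt = min(n, col + 2)
--                 for i in range(top, bot):
--                     for j in range(lft, rgt):
--                         if data[i][j] == "@":
--                             total += 1
--                 if total - 1 < 4:
--                     stack.append((row, col))
--                     count += 1
--
--         return count
--
--     # Iteratively count and remove accessible cells
--     while True:
--         if (curr_count := count_accessible()) == 0:
--             return count
--         else:
--             count += curr_count
--             # Remove cells in stack
--             while stack:
--                 row, col = stack.pop()
--                 data[row] = data[row][:col] + "." + data[row][col + 1 :]
-- ===== SOURCE B (Python) =====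
-- def part2(data):
--     # Worklist peeling: instead of rescanning the whole grid in synchronized
--     # rounds, keep a stack of cells whose status may have changed; when a cell
--     # is removed, only its neighbours are re-examined (BFS-style propagation).
--     lines = [line.strip() for line in data if line.strip()]
--     n = len(lines[0])
--     cells = [(r, c) for r, line in enumerate(lines)
--              for c in range(n) if line[c] == "@"]
--     live = set(cells)
--     work = list(cells)
--     removed = 0
--     while work:
--         p = work.pop()
--         if p not in live:
--             continue
--         r, c = p
--         nbrs = [(r + dr, c + dc) for dr in (-1, 0, 1) for dc in (-1, 0, 1)
--                 if (dr, dc) != (0, 0)]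
--         if sum(q in live for q in nbrs) < 4:
--             live.discard(p)
--             removed += 1
--             work.extend(q for q in nbrs if q in live)
--     return removed
-- ===== Notes on version B (the rewrite author's own statement) =====
-- stated objective: alternative
-- what changed: B replaces A's fixed-point of whole-grid rescans (each round re-counts every cell's 3x3 window and splices removed cells out of the row strings) by a worklist/BFS peeling over a set of live coordinates: a stack of cells whose status may have changed; when a popped cell has fewer than 4 live neighbours it is removed and only its live neighbours are pushed for re-examination.
import Mathlib
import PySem

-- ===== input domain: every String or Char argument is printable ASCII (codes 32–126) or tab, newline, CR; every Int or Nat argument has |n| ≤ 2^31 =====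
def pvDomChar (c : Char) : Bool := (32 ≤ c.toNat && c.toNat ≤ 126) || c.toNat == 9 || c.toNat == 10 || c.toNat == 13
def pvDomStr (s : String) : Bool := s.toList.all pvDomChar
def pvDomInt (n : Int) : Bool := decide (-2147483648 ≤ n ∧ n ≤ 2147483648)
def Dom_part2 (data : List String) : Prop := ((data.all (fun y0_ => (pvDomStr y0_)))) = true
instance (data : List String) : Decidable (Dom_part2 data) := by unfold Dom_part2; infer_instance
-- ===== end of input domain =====

-- B replaces A's repeated whole-grid rescan rounds (clipped window loops, a removal
-- stack, string splicing) by a worklist/BFS peeling over a set of live cells: removing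
-- a cell re-examines only its neighbours. Equivalence is proved via the unique maximal
-- 'closed' subset both peelings converge to.

-- ===== PORT A =====
-- shared boilerplate of both Pythons: [line.strip() for line in data if line.strip()]
def cleanLines (data : List String) : List (List Char) :=
  data.filterMap (fun line =>
    let s := PySem.Chars.strip line.toList
    if s = [] then none else some s)

-- data[row][col]  (in-range under Pre_, where the defaults are never used)
def charAt (g : List (List Char)) (r c : Int) : Char :=
  PySem.List.pyGetD (PySem.List.pyGetD g r []) c '.'

-- the window total of A's inner two loops
def totalA (m n : Int) (g : List (List Char)) (row col : Int) : Int :=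
  (PySem.List.pyRange (max 0 (row - 1)) (min m (row + 2)) 1).foldl (fun t i =>
    (PySem.List.pyRange (max 0 (col - 1)) (min n (col + 2)) 1).foldl (fun t j =>
      if charAt g i j = '@' then t + 1 else t) t) 0

-- count_accessible: returns (count, stack)
def countAccessible (m n : Int) (g : List (List Char)) : Int × List (Int × Int) :=
  (PySem.List.pyRange 0 m 1).foldl (fun st row =>
    (PySem.List.pyRange 0 n 1).foldl (fun st col =>
      if charAt g row col ≠ '@' then st
      else if totalA m n g row col - 1 < 4 then (st.1 + 1, st.2 ++ [(row, col)])
      else st) st) ((0 : Int), ([] : List (Int × Int)))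

-- data[row] = data[row][:col] + "." + data[row][col+1:]
def spliceCell (g : List (List Char)) (p : Int × Int) : List (List Char) :=
  PySem.List.pySetD g p.1
    (PySem.List.slice (PySem.List.pyGetD g p.1 []) none (some p.2) ++
      '.' :: PySem.List.slice (PySem.List.pyGetD g p.1 []) (some (p.2 + 1)) none)

-- while stack: row, col = stack.pop(); splice that cell (pop from the end = reverse order)
def removeStack (g : List (List Char)) (stack : List (Int × Int)) : List (List Char) :=
  stack.reverse.foldl spliceCell g

-- the 'while True' loop; fuel m*n+1 always suffices (every productive round removes a cell)
def loopA (fuel : Nat) (m n : Int) (g : List (List Char)) (count : Int) : Int :=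
  match fuel with
  | 0 => count
  | f + 1 =>
    let cs := countAccessible m n g
    if cs.1 = 0 then count else loopA f m n (removeStack g cs.2) (count + cs.1)

def part2 (data : List String) : Int :=
  let rows := cleanLines data
  let m : Int := PySem.List.len rows
  let n : Int := PySem.List.len (PySem.List.pyGetD rows 0 [])
  loopA (rows.length * (PySem.List.pyGetD rows 0 []).length + 1) m n rows 0

-- ===== PORT B =====
-- [(r+dr, c+dc) for dr in (-1,0,1) for dc in (-1,0,1) if (dr,dc) != (0,0)]
def nbrsB (r c : Int) : List (Int × Int) :=
  ([-1, 0, 1] : List Int).flatMap (fun dr =>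
    (([-1, 0, 1] : List Int).filter (fun dc => decide ((dr, dc) ≠ ((0 : Int), (0 : Int))))).map
      (fun dc => (r + dr, c + dc)))

-- the 'while work:' loop; fuel |work| + 9*|live| + 1 always suffices (see measure in the proofs)
def loopB (fuel : Nat) (live : PySem.Set (Int × Int)) (work : List (Int × Int))
    (removed : Int) : Int :=
  match fuel with
  | 0 => removed
  | f + 1 =>
    match work.getLast? with        -- p = work.pop()
    | none => removed
    | some p =>
      let work' := work.dropLast
      if ¬ PySem.Set.contains live p then loopB f live work' removed
      else
        let nbrs := nbrsB p.1 p.2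
        if ((nbrs.countP (fun q => PySem.Set.contains live q) : Int)) < 4 then
          let live' := PySem.Set.discard live p
          loopB f live' (work' ++ nbrs.filter (fun q => PySem.Set.contains live' q))
            (removed + 1)
        else loopB f live work' removed

def part2_alt (data : List String) : Int :=
  let lines := cleanLines data
  let n : Int := PySem.List.len (PySem.List.pyGetD lines 0 [])
  let cells : List (Int × Int) :=
    (PySem.List.enumerate lines).flatMap (fun rl =>
      ((PySem.List.pyRange 0 n 1).filter
          (fun c => decide (PySem.List.pyGetD rl.2 c '.' = '@'))).map (fun c => (rl.1, c)))
  let live : PySem.Set (Int × Int) := PySem.Set.ofList cells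
  loopB (cells.length + 9 * live.length + 1) live cells 0

-- ===== PRECONDITION & SPEC =====
-- Pre_ excludes exactly the inputs where A raises IndexError: no nonblank line at all
-- (data[0] fails), or a stripped line shorter than the first one (data[row][col] fails).
def Pre_part2 (data : List String) : Prop :=
  cleanLines data ≠ [] ∧
    ∀ s ∈ cleanLines data, ((cleanLines data).headD []).length ≤ s.length
instance (data : List String) : Decidable (Pre_part2 data) := by unfold Pre_part2; infer_instance

def pvWitness_part2 : List String := ["@.@", ".@.", "@.@"]

def Spec_part2 (data : List String) (out : Int) : Prop := out = part2_alt data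
instance (data : List String) (out : Int) : Decidable (Spec_part2 data out) := by
  unfold Spec_part2; infer_instance

-- ===== CLAIM (what is proved, stated in full; the proofs are below) =====
def Claim_equal_part2 : Prop :=
  ∀ (data : List String), Dom_part2 data → Pre_part2 data → Spec_part2 data (part2 data)

-- ===== LEMMAS AND PROOFS =====

-- the set of live '@' coordinates of a grid, in row-major order
def liveOf (m n : Int) (g : List (List Char)) : List (Int × Int) :=
  (PySem.List.pyRange 0 m 1).flatMap (fun r =>
    ((PySem.List.pyRange 0 n 1).filter (fun c => decide (charAt g r c = '@'))).map
      (fun c => (r, c)))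

def Shape (m n : Int) (g : List (List Char)) : Prop :=
  (g.length : Int) = m ∧ 0 ≤ n ∧ ∀ row ∈ g, n.toNat ≤ row.length

-- the list A's count_accessible pushes on the stack, in row-major order
def stackOf (m n : Int) (g : List (List Char)) : List (Int × Int) :=
  (PySem.List.pyRange 0 m 1).flatMap (fun r =>
    ((PySem.List.pyRange 0 n 1).filter
        (fun c => decide (charAt g r c = '@') && decide (totalA m n g r c - 1 < 4))).map
      (fun c => (r, c)))

-- the 9-cell window count of a live set (proof-side bridge between A's totalA and B's nbrsB)
def bDeg (live : List (Int × Int)) (p : Int × Int) : Int :=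
  (([-1, 0, 1] : List Int).flatMap (fun dr =>
      ([-1, 0, 1] : List Int).map (fun dc => (p.1 + dr, p.2 + dc)))).foldl
    (fun t q => t + if PySem.Set.contains live q then 1 else 0) 0

-- the list A's round removes
def lowOf (m n : Int) (g : List (List Char)) : List (Int × Int) :=
  (liveOf m n g).filter (fun p => decide (bDeg (liveOf m n g) p - 1 < 4))

-- B's 8-neighbour live count
def nbrCount (live : List (Int × Int)) (p : Int × Int) : Nat :=
  (nbrsB p.1 p.2).countP (fun q => PySem.Set.contains live q)

-- a set every cell of which has at least 4 live neighbours inside it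
def ClosedS (live : List (Int × Int)) : Prop := ∀ p ∈ live, 4 ≤ nbrCount live p

-- the unique maximal closed subset of S: what survives any peeling order
def IsCore (S F : List (Int × Int)) : Prop :=
  F.Nodup ∧ ClosedS F ∧ F ⊆ S ∧ ∀ G : List (Int × Int), ClosedS G → G ⊆ S → G ⊆ F

def InR (m n : Int) (p : Int × Int) : Prop := 0 ≤ p.1 ∧ p.1 < m ∧ 0 ≤ p.2 ∧ p.2 < n

lemma mem_liveOf (m n : Int) (g : List (List Char)) (p : Int × Int) :
    p ∈ liveOf m n g ↔ 0 ≤ p.1 ∧ p.1 < m ∧ 0 ≤ p.2 ∧ p.2 < n ∧ charAt g p.1 p.2 = '@' := by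
  obtain ⟨a, b⟩ := p
  simp only [liveOf, List.mem_flatMap, List.mem_map, List.mem_filter,
    PySem.List.mem_pyRange_one, decide_eq_true_eq, Prod.mk.injEq]
  constructor
  · rintro ⟨r, hr, c, ⟨hc, hch⟩, rfl, rfl⟩
    exact ⟨hr.1, hr.2, hc.1, hc.2, hch⟩
  · rintro ⟨h1, h2, h3, h4, h5⟩
    exact ⟨a, ⟨h1, h2⟩, b, ⟨⟨h3, h4⟩, h5⟩, rfl, rfl⟩

lemma nodup_liveOf (m n : Int) (g : List (List Char)) : (liveOf m n g).Nodup := by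
  refine List.nodup_flatMap.mpr ⟨?_, ?_⟩
  · intro r _
    exact ((PySem.List.nodup_pyRange_one 0 n).filter _).map (fun a b hab => by simpa using hab)
  · refine (PySem.List.pairwise_lt_pyRange_one 0 m).imp ?_
    intro r r' hlt x hx hx'
    simp only [List.mem_map, List.mem_filter] at hx hx'
    rcases hx with ⟨c, _, rfl⟩
    rcases hx' with ⟨c', _, h'⟩
    have : r' = r := congrArg Prod.fst h'
    omega

lemma countAccessible_eq (m n : Int) (g : List (List Char)) :
    countAccessible m n g = (((stackOf m n g).length : Int), stackOf m n g) := by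
  unfold countAccessible
  have hpt : ∀ (st : Int × List (Int × Int)) (row : Int),
      (PySem.List.pyRange 0 n 1).foldl (fun st col =>
        if charAt g row col ≠ '@' then st
        else if totalA m n g row col - 1 < 4 then (st.1 + 1, st.2 ++ [(row, col)])
        else st) st
      = (st.1 + (((PySem.List.pyRange 0 n 1).filter
            (fun c => decide (charAt g row c = '@') && decide (totalA m n g row c - 1 < 4))).length : Int),
         st.2 ++ ((PySem.List.pyRange 0 n 1).filter
            (fun c => decide (charAt g row c = '@') && decide (totalA m n g row c - 1 < 4))).map
            (fun c => (row, c))) := by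
    intro st row
    obtain ⟨a, b⟩ := st
    have hstep : (fun (st : Int × List (Int × Int)) col =>
        if charAt g row col ≠ '@' then st
        else if totalA m n g row col - 1 < 4 then (st.1 + 1, st.2 ++ [(row, col)])
        else st)
        = fun st col =>
          ((fun (x : Int) col => if charAt g row col = '@' ∧ totalA m n g row col - 1 < 4 then x + 1 else x) st.1 col,
           (fun (x : List (Int × Int)) col => if charAt g row col = '@' ∧ totalA m n g row col - 1 < 4 then x ++ [(row, col)] else x) st.2 col) := by
      funext st col
      by_cases h1 : charAt g row col = '@' <;> by_cases h2 : totalA m n g row col - 1 < 4 <;>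
        simp [h1, h2]
    rw [hstep, PySem.List.foldl_prod_mk
      (f := fun (x : Int) col => if charAt g row col = '@' ∧ totalA m n g row col - 1 < 4 then x + 1 else x)
      (g := fun (x : List (Int × Int)) col => if charAt g row col = '@' ∧ totalA m n g row col - 1 < 4 then x ++ [(row, col)] else x)]
    rw [PySem.List.foldl_ite_add_one (p := fun col => charAt g row col = '@' ∧ totalA m n g row col - 1 < 4),
      PySem.List.foldl_append_ite (p := fun col => charAt g row col = '@' ∧ totalA m n g row col - 1 < 4)
        (f := fun col => (row, col))]
    simp [List.countP_eq_length_filter, Bool.decide_and]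
  have houter : (fun (st : Int × List (Int × Int)) row =>
      (PySem.List.pyRange 0 n 1).foldl (fun st col =>
        if charAt g row col ≠ '@' then st
        else if totalA m n g row col - 1 < 4 then (st.1 + 1, st.2 ++ [(row, col)])
        else st) st)
      = fun st row =>
        ((fun (x : Int) row => x + (((PySem.List.pyRange 0 n 1).filter
            (fun c => decide (charAt g row c = '@') && decide (totalA m n g row c - 1 < 4))).length : Int)) st.1 row,
         (fun (x : List (Int × Int)) row => x ++ ((PySem.List.pyRange 0 n 1).filter
            (fun c => decide (charAt g row c = '@') && decide (totalA m n g row c - 1 < 4))).map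
            (fun c => (row, c))) st.2 row) := by
    funext st row
    exact hpt st row
  rw [houter, PySem.List.foldl_prod_mk
    (f := fun (x : Int) row => x + (((PySem.List.pyRange 0 n 1).filter
        (fun c => decide (charAt g row c = '@') && decide (totalA m n g row c - 1 < 4))).length : Int))
    (g := fun (x : List (Int × Int)) row => x ++ ((PySem.List.pyRange 0 n 1).filter
        (fun c => decide (charAt g row c = '@') && decide (totalA m n g row c - 1 < 4))).map
        (fun c => (row, c)))]
  rw [PySem.List.foldl_add (PySem.List.pyRange 0 m 1)
    (fun row => (((PySem.List.pyRange 0 n 1).filter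
        (fun c => decide (charAt g row c = '@') && decide (totalA m n g row c - 1 < 4))).length : Int)) 0]
  rw [PySem.List.foldl_append_eq_flatMap]
  simp [stackOf, List.length_flatMap, Nat.cast_list_sum, List.map_map, Function.comp_def,
    List.length_map]

lemma sum_clip (m r : Int) (f : Int → Int) (h0 : 0 ≤ r) (h1 : r < m)
    (hlo : ∀ i, i < 0 → f i = 0) (hhi : ∀ i, m ≤ i → f i = 0) :
    ((PySem.List.pyRange (max 0 (r - 1)) (min m (r + 2)) 1).map f).sum =
      f (r - 1) + f r + f (r + 1) := by
  rcases (by omega : 1 ≤ r ∨ r < 1) with hr | hr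
  · have ha : max 0 (r - 1) = r - 1 := by omega
    rcases (by omega : r + 2 ≤ m ∨ m < r + 2) with hm | hm
    · have hb : min m (r + 2) = r + 2 := by omega
      rw [ha, hb, PySem.List.pyRange_one_cons (by omega), PySem.List.pyRange_one_cons (by omega),
        PySem.List.pyRange_one_cons (by omega), PySem.List.pyRange_one_eq_nil (by omega)]
      have e1 : r - 1 + 1 = r := by omega
      rw [e1]
      simp only [List.map_cons, List.map_nil, List.sum_cons, List.sum_nil]
      ring
    · have hm2 : m = r + 1 := by omega
      subst hm2
      have hb : min (r + 1) (r + 2) = r + 1 := by omega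
      rw [ha, hb, PySem.List.pyRange_one_cons (by omega), PySem.List.pyRange_one_cons (by omega),
        PySem.List.pyRange_one_eq_nil (by omega)]
      have e1 : r - 1 + 1 = r := by omega
      rw [e1]
      have h3 : f (r + 1) = 0 := hhi _ (by omega)
      simp only [List.map_cons, List.map_nil, List.sum_cons, List.sum_nil]
      rw [h3]; ring
  · have hr0 : r = 0 := by omega
    subst hr0
    have ha : max (0:Int) (0 - 1) = 0 := by omega
    have hflo : f (0 - 1) = 0 := hlo _ (by omega)
    rcases (by omega : 2 ≤ m ∨ m < 2) with hm | hm
    · have hb : min m (0 + 2) = 2 := by omega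
      rw [ha, hb, PySem.List.pyRange_one_cons (by omega), PySem.List.pyRange_one_cons (by omega),
        PySem.List.pyRange_one_eq_nil (by omega)]
      simp only [List.map_cons, List.map_nil, List.sum_cons, List.sum_nil]
      rw [hflo]; ring
    · have hm1 : m = 1 := by omega
      subst hm1
      have hb : min (1:Int) (0 + 2) = 1 := by omega
      rw [ha, hb, PySem.List.pyRange_one_cons (by omega), PySem.List.pyRange_one_eq_nil (by omega)]
      have h3 : f (0 + 1) = 0 := hhi _ (by omega)
      simp only [List.map_cons, List.map_nil, List.sum_cons, List.sum_nil]
      rw [hflo, h3]; ring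

lemma totalA_eq_bDeg (m n : Int) (g : List (List Char)) (r c : Int)
    (hr0 : 0 ≤ r) (hr1 : r < m) (hc0 : 0 ≤ c) (hc1 : c < n) :
    totalA m n g r c = bDeg (liveOf m n g) (r, c) := by
  have hzero : ∀ i j : Int, ¬ (0 ≤ i ∧ i < m ∧ 0 ≤ j ∧ j < n) →
      (if (i, j) ∈ liveOf m n g then (1 : Int) else 0) = 0 := by
    intro i j h
    rw [if_neg]
    intro hmem
    rcases (mem_liveOf m n g (i, j)).mp hmem with ⟨a1, a2, a3, a4, _⟩
    exact h ⟨a1, a2, a3, a4⟩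
  have hiff : ∀ i j : Int, 0 ≤ i → i < m → 0 ≤ j → j < n →
      (((i, j) ∈ liveOf m n g) ↔ charAt g i j = '@') := by
    intro i j h1 h2 h3 h4
    rw [mem_liveOf]
    constructor
    · rintro ⟨_, _, _, _, h⟩; exact h
    · intro h; exact ⟨h1, h2, h3, h4, h⟩
  unfold totalA
  have houter : (fun (t i : Int) =>
      (PySem.List.pyRange (max 0 (c - 1)) (min n (c + 2)) 1).foldl
        (fun t j => if charAt g i j = '@' then t + 1 else t) t)
      = fun t i => t + ((List.countP (fun j => decide (charAt g i j = '@'))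
          (PySem.List.pyRange (max 0 (c - 1)) (min n (c + 2)) 1) : Nat) : Int) := by
    funext t i
    rw [PySem.List.foldl_ite_add_one (p := fun j => charAt g i j = '@')]
  rw [houter]
  rw [PySem.List.foldl_add (PySem.List.pyRange (max 0 (r - 1)) (min m (r + 2)) 1)
    (fun i => ((List.countP (fun j => decide (charAt g i j = '@'))
      (PySem.List.pyRange (max 0 (c - 1)) (min n (c + 2)) 1) : Nat) : Int)) 0]
  rw [zero_add]
  have hcnt : ∀ i ∈ PySem.List.pyRange (max 0 (r - 1)) (min m (r + 2)) 1,
      ((List.countP (fun j => decide (charAt g i j = '@'))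
        (PySem.List.pyRange (max 0 (c - 1)) (min n (c + 2)) 1) : Nat) : Int)
      = ((PySem.List.pyRange (max 0 (c - 1)) (min n (c + 2)) 1).map
          (fun j => if (i, j) ∈ liveOf m n g then (1 : Int) else 0)).sum := by
    intro i hi
    rw [PySem.List.mem_pyRange_one] at hi
    rw [← PySem.List.sum_map_ite_one_zero (fun j => decide (charAt g i j = '@'))]
    refine congrArg List.sum (List.map_congr_left ?_)
    intro j hj
    rw [PySem.List.mem_pyRange_one] at hj
    have hiffij := hiff i j (by omega) (by omega) (by omega) (by omega)
    simp [hiffij]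
  rw [List.map_congr_left hcnt]
  have hcols : ∀ i : Int,
      ((PySem.List.pyRange (max 0 (c - 1)) (min n (c + 2)) 1).map
        (fun j => if (i, j) ∈ liveOf m n g then (1 : Int) else 0)).sum
      = (if (i, c - 1) ∈ liveOf m n g then (1 : Int) else 0)
        + (if (i, c) ∈ liveOf m n g then (1 : Int) else 0)
        + (if (i, c + 1) ∈ liveOf m n g then (1 : Int) else 0) :=
    fun i => sum_clip n c _ hc0 hc1 (fun j hj => hzero i j (by omega))
      (fun j hj => hzero i j (by omega))
  have hrows := sum_clip m r (fun i =>
      ((PySem.List.pyRange (max 0 (c - 1)) (min n (c + 2)) 1).map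
        (fun j => if (i, j) ∈ liveOf m n g then (1 : Int) else 0)).sum) hr0 hr1
    (fun i hi => List.sum_eq_zero (by
      intro x hx
      rcases List.mem_map.mp hx with ⟨j, hj, rfl⟩
      exact hzero i j (by omega)))
    (fun i hi => List.sum_eq_zero (by
      intro x hx
      rcases List.mem_map.mp hx with ⟨j, hj, rfl⟩
      exact hzero i j (by omega)))
  rw [hrows]
  simp only [hcols]
  simp only [bDeg, List.flatMap_cons, List.flatMap_nil, List.map_cons, List.map_nil,
    List.append_nil, List.cons_append, List.nil_append, List.foldl_cons, List.foldl_nil,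
    PySem.Set.contains, List.contains_eq_mem, decide_eq_true_eq]
  simp only [← sub_eq_add_neg, add_zero]
  ring

-- filtering the live set = pushing the filter into its row-major construction
lemma filter_liveOf (m n : Int) (g : List (List Char)) (q : Int × Int → Bool) :
    (liveOf m n g).filter q =
      (PySem.List.pyRange 0 m 1).flatMap (fun r =>
        ((PySem.List.pyRange 0 n 1).filter
          (fun c => decide (charAt g r c = '@') && q (r, c))).map (fun c => (r, c))) := by
  simp only [liveOf]
  rw [List.filter_flatMap, List.flatMap_def, List.flatMap_def]
  congr 1
  apply List.map_congr_left
  intro r _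
  rw [List.filter_map, List.filter_filter]
  congr 1
  apply List.filter_congr
  intro a _
  simp [Function.comp, Bool.and_comm]

lemma stackOf_eq_lowOf (m n : Int) (g : List (List Char)) :
    stackOf m n g = lowOf m n g := by
  unfold stackOf
  rw [lowOf, filter_liveOf, List.flatMap_def, List.flatMap_def]
  congr 1
  apply List.map_congr_left
  intro r hr
  congr 1
  apply List.filter_congr
  intro a ha
  rw [PySem.List.mem_pyRange_one] at hr ha
  rw [totalA_eq_bDeg m n g r a hr.1 hr.2 ha.1 ha.2]

lemma splice_shape (m n : Int) (g : List (List Char)) (p : Int × Int)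
    (hs : Shape m n g) (hp : InR m n p) : Shape m n (spliceCell g p) := by
  obtain ⟨hm, hn0, hrow⟩ := hs
  obtain ⟨hp1, hp2, hp3, hp4⟩ := hp
  have hplen : p.1 < (g.length : Int) := by omega
  unfold spliceCell
  rw [PySem.List.pyGetD_eq_getElem g [] hp1 hplen]
  have hrl : n.toNat ≤ (g[p.1.toNat]).length := hrow _ (List.getElem_mem _)
  have hc : p.2.toNat < (g[p.1.toNat]).length := by omega
  have hs1 : PySem.List.slice g[p.1.toNat] none (some p.2) ++
      '.' :: PySem.List.slice g[p.1.toNat] (some (p.2 + 1)) none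
      = (g[p.1.toNat]).set p.2.toNat '.' := by
    rw [PySem.List.slice_to _ hp3, PySem.List.slice_from _ (by omega : (0:Int) ≤ p.2 + 1),
      List.set_eq_take_cons_drop _ hc]
    have e : (p.2 + 1).toNat = p.2.toNat + 1 := by omega
    rw [e]
  rw [hs1, PySem.List.pySetD_of_nonneg _ _ hp1]
  refine ⟨by simpa using hm, hn0, ?_⟩
  intro row' hrow'
  rcases List.mem_or_eq_of_mem_set hrow' with h | h
  · exact hrow _ h
  · subst h; simpa using hrl

lemma splice_charAt (m n : Int) (g : List (List Char)) (p : Int × Int)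
    (hs : Shape m n g) (hp : InR m n p) (i j : Int)
    (hi0 : 0 ≤ i) (hi1 : i < m) (hj0 : 0 ≤ j) (hj1 : j < n) :
    charAt (spliceCell g p) i j = if (i, j) = p then '.' else charAt g i j := by
  obtain ⟨hm, hn0, hrow⟩ := hs
  obtain ⟨hp1, hp2, hp3, hp4⟩ := hp
  have hplen : p.1 < (g.length : Int) := by omega
  have hrl : n.toNat ≤ (g[p.1.toNat]).length := hrow _ (List.getElem_mem _)
  have hc : p.2.toNat < (g[p.1.toNat]).length := by omega
  unfold spliceCell
  rw [PySem.List.pyGetD_eq_getElem g [] hp1 hplen]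
  have hs1 : PySem.List.slice g[p.1.toNat] none (some p.2) ++
      '.' :: PySem.List.slice g[p.1.toNat] (some (p.2 + 1)) none
      = (g[p.1.toNat]).set p.2.toNat '.' := by
    rw [PySem.List.slice_to _ hp3, PySem.List.slice_from _ (by omega : (0:Int) ≤ p.2 + 1),
      List.set_eq_take_cons_drop _ hc]
    have e : (p.2 + 1).toNat = p.2.toNat + 1 := by omega
    rw [e]
  rw [hs1, PySem.List.pySetD_of_nonneg _ _ hp1]
  rw [charAt]
  have hilen : i < (((g.set p.1.toNat ((g[p.1.toNat]).set p.2.toNat '.'))).length : Int) := by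
    rw [List.length_set]; omega
  rw [PySem.List.pyGetD_eq_getElem _ [] hi0 hilen, List.getElem_set]
  by_cases hik : p.1.toNat = i.toNat
  · rw [if_pos hik]
    have hieq : i = p.1 := by omega
    have hjlen : j < ((((g[p.1.toNat]).set p.2.toNat '.')).length : Int) := by
      rw [List.length_set]; omega
    rw [PySem.List.pyGetD_eq_getElem _ '.' hj0 hjlen, List.getElem_set]
    by_cases hjc : p.2.toNat = j.toNat
    · rw [if_pos hjc]
      have hje : (i, j) = p := by
        have : j = p.2 := by omega
        rw [hieq, this]
      rw [if_pos hje]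
    · rw [if_neg hjc]
      have hne : ¬ (i, j) = p := by
        intro h
        have : j = p.2 := congrArg Prod.snd h
        omega
      rw [if_neg hne, charAt]
      rw [PySem.List.pyGetD_eq_getElem g [] hi0 (by omega : i < (g.length : Int))]
      have hit : i.toNat = p.1.toNat := by omega
      simp only [hit]
      rw [PySem.List.pyGetD_eq_getElem _ '.' hj0 (by omega : j < ((g[p.1.toNat]).length : Int))]
  · rw [if_neg hik]
    have hne : ¬ (i, j) = p := by
      intro h
      have : i = p.1 := congrArg Prod.fst h
      omega
    rw [if_neg hne, charAt]
    rw [PySem.List.pyGetD_eq_getElem g [] hi0 (by omega : i < (g.length : Int))]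

lemma foldl_splice (m n : Int) (l : List (Int × Int)) :
    ∀ (g : List (List Char)), Shape m n g → (∀ p ∈ l, InR m n p) →
    Shape m n (l.foldl spliceCell g) ∧
      ∀ i j, 0 ≤ i → i < m → 0 ≤ j → j < n →
        charAt (l.foldl spliceCell g) i j = if (i, j) ∈ l then '.' else charAt g i j := by
  induction l with
  | nil =>
    intro g hs _
    exact ⟨hs, fun i j _ _ _ _ => by simp⟩
  | cons p t ih =>
    intro g hs hl
    have hp := hl p (by simp)
    have hs' := splice_shape m n g p hs hp
    have ht : ∀ q ∈ t, InR m n q := fun q hq => hl q (by simp [hq])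
    obtain ⟨ihs, ihc⟩ := ih (spliceCell g p) hs' ht
    refine ⟨by simpa using ihs, ?_⟩
    intro i j hi0 hi1 hj0 hj1
    simp only [List.foldl_cons]
    rw [ihc i j hi0 hi1 hj0 hj1, splice_charAt m n g p hs hp i j hi0 hi1 hj0 hj1]
    by_cases h1 : (i, j) ∈ t <;> by_cases h2 : (i, j) = p <;> simp [h1, h2]

lemma removeStack_shape (m n : Int) (g : List (List Char)) (stack : List (Int × Int))
    (hs : Shape m n g) (hl : ∀ p ∈ stack, InR m n p) :
    Shape m n (removeStack g stack) := by
  have h := (foldl_splice m n stack.reverse g hs (fun p hp => hl p (List.mem_reverse.mp hp))).1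
  simp only [removeStack]
  exact h

lemma removeStack_charAt (m n : Int) (g : List (List Char)) (stack : List (Int × Int))
    (hs : Shape m n g) (hl : ∀ p ∈ stack, InR m n p) (i j : Int)
    (hi0 : 0 ≤ i) (hi1 : i < m) (hj0 : 0 ≤ j) (hj1 : j < n) :
    charAt (removeStack g stack) i j = if (i, j) ∈ stack then '.' else charAt g i j := by
  simp only [removeStack]
  rw [(foldl_splice m n stack.reverse g hs
    (fun p hp => hl p (List.mem_reverse.mp hp))).2 i j hi0 hi1 hj0 hj1]
  simp [List.mem_reverse]

lemma mem_lowOf_InR (m n : Int) (g : List (List Char)) (p : Int × Int)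
    (hp : p ∈ lowOf m n g) : InR m n p := by
  rw [lowOf, List.mem_filter] at hp
  have h := (mem_liveOf m n g p).mp hp.1
  exact ⟨h.1, h.2.1, h.2.2.1, h.2.2.2.1⟩

lemma liveOf_removeStack (m n : Int) (g : List (List Char)) (hs : Shape m n g) :
    liveOf m n (removeStack g (lowOf m n g)) =
      PySem.Set.diff (liveOf m n g) (lowOf m n g) := by
  have hlow := mem_lowOf_InR m n g
  simp only [PySem.Set.diff]
  rw [filter_liveOf]
  simp only [liveOf]
  rw [List.flatMap_def, List.flatMap_def]
  congr 1
  apply List.map_congr_left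
  intro r hr
  congr 1
  apply List.filter_congr
  intro a ha
  rw [PySem.List.mem_pyRange_one] at hr ha
  have hca := removeStack_charAt m n g (lowOf m n g) hs hlow r a hr.1 hr.2 ha.1 ha.2
  by_cases hmem : (r, a) ∈ lowOf m n g
  · rw [if_pos hmem] at hca
    simp [hca, List.contains_eq_mem, hmem]
  · rw [if_neg hmem] at hca
    simp [hca, List.contains_eq_mem, hmem]

lemma liveOf_length_le (m n : Int) (g : List (List Char)) :
    (liveOf m n g).length ≤ (PySem.List.pyRange 0 m 1).length * n.toNat := by
  rw [liveOf, List.length_flatMap]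
  have hb : ∀ x ∈ (PySem.List.pyRange 0 m 1).map (fun r =>
      (((PySem.List.pyRange 0 n 1).filter (fun c => decide (charAt g r c = '@'))).map
        (fun c => (r, c))).length), x ≤ n.toNat := by
    intro x hx
    rcases List.mem_map.mp hx with ⟨r, _, rfl⟩
    simp only [List.length_map]
    exact le_trans (List.length_filter_le _ _)
      (by rw [PySem.List.length_pyRange_one]; simp)
  have h := List.sum_le_card_nsmul _ n.toNat hb
  simpa [smul_eq_mul] using h

-- ===== core theory =====

lemma mem_nbrsB (r c : Int) (q : Int × Int) :
    q ∈ nbrsB r c ↔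
      r - 1 ≤ q.1 ∧ q.1 ≤ r + 1 ∧ c - 1 ≤ q.2 ∧ q.2 ≤ c + 1 ∧ q ≠ (r, c) := by
  obtain ⟨a, b⟩ := q
  simp only [nbrsB, List.mem_flatMap, List.mem_map, List.mem_filter, List.mem_cons,
    List.not_mem_nil, or_false, decide_eq_true_eq, ne_eq, Prod.mk.injEq, not_and]
  constructor
  · rintro ⟨dr, hdr, dc, ⟨hdc, hne⟩, rfl, rfl⟩
    refine ⟨by rcases hdr with h|h|h <;> omega, by rcases hdr with h|h|h <;> omega,
      by rcases hdc with h|h|h <;> omega, by rcases hdc with h|h|h <;> omega, ?_⟩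
    intro h1 h2
    exact hne (by omega) (by omega)
  · rintro ⟨h1, h2, h3, h4, h5⟩
    refine ⟨a - r, by omega, b - c, ⟨by omega, ?_⟩, by omega, by omega⟩
    intro hdr hdc
    exact h5 (by omega) (by omega)

lemma nbrsB_symm (p q : Int × Int) : q ∈ nbrsB p.1 p.2 ↔ p ∈ nbrsB q.1 q.2 := by
  rw [mem_nbrsB, mem_nbrsB]
  obtain ⟨a, b⟩ := p; obtain ⟨c, d⟩ := q
  simp only [ne_eq, Prod.mk.injEq, not_and]
  constructor <;>
    · rintro ⟨h1, h2, h3, h4, h5⟩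
      refine ⟨by omega, by omega, by omega, by omega, ?_⟩
      intro e1 e2
      exact h5 (by omega) (by omega)

lemma length_nbrsB (r c : Int) : (nbrsB r c).length = 8 := by
  simp [nbrsB]

lemma nbrCount_mono (G S : List (Int × Int)) (h : G ⊆ S) (p : Int × Int) :
    nbrCount G p ≤ nbrCount S p := by
  refine List.countP_mono_left ?_
  intro q _ hq
  simp only [PySem.Set.contains, List.contains_eq_mem, decide_eq_true_eq] at hq ⊢
  exact h hq

lemma closed_not_low (G S : List (Int × Int)) (hG : ClosedS G) (hsub : G ⊆ S)
    (p : Int × Int) (hp : (nbrCount S p : Int) < 4) : p ∉ G := by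
  intro hmem
  have h1 := hG p hmem
  have h2 := nbrCount_mono G S hsub p
  omega

lemma core_len_unique (S F1 F2 : List (Int × Int)) (h1 : IsCore S F1) (h2 : IsCore S F2) :
    F1.length = F2.length := by
  obtain ⟨hn1, hc1, hs1, hm1⟩ := h1
  obtain ⟨hn2, hc2, hs2, hm2⟩ := h2
  have h12 : F1 ⊆ F2 := hm2 F1 hc1 hs1
  have h21 : F2 ⊆ F1 := hm1 F2 hc2 hs2
  exact le_antisymm (hn1.subperm h12).length_le (hn2.subperm h21).length_le

-- count unchanged by deleting a non-neighbour
lemma nbrCount_discard_of_not_nbr (live : List (Int × Int)) (p q : Int × Int)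
    (h : p ∉ nbrsB q.1 q.2) :
    nbrCount (PySem.Set.discard live p) q = nbrCount live q := by
  refine List.countP_congr ?_
  intro x hx
  simp only [PySem.Set.contains, List.contains_eq_mem]
  have hxp : x ≠ p := fun he => h (he ▸ hx)
  simp [PySem.Set.mem_discard, hxp]

lemma bDeg_eq_nbrCount (live : List (Int × Int)) (p : Int × Int) (hp : p ∈ live) :
    bDeg live p = (nbrCount live p : Int) + 1 := by
  obtain ⟨r, c⟩ := p
  simp [bDeg, nbrsB, nbrCount, List.countP_cons, List.foldl_cons]
  simp only [hp, if_true]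
  ac_rfl

lemma mem_lowOf_iff (m n : Int) (g : List (List Char)) (p : Int × Int) :
    p ∈ lowOf m n g ↔ p ∈ liveOf m n g ∧ (nbrCount (liveOf m n g) p : Int) < 4 := by
  rw [lowOf, List.mem_filter]
  constructor
  · rintro ⟨h1, h2⟩
    rw [decide_eq_true_eq, bDeg_eq_nbrCount _ _ h1] at h2
    exact ⟨h1, by omega⟩
  · rintro ⟨h1, h2⟩
    refine ⟨h1, ?_⟩
    rw [decide_eq_true_eq, bDeg_eq_nbrCount _ _ h1]
    omega

lemma diff_eq_filter_not (live low : List (Int × Int)) :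
    PySem.Set.diff live low = live.filter (fun x => ¬ x ∈ low) := by
  simp [PySem.Set.diff, List.contains_eq_mem]

lemma length_diff_lowOf (m n : Int) (g : List (List Char)) :
    (PySem.Set.diff (liveOf m n g) (lowOf m n g)).length
      = (liveOf m n g).length - (lowOf m n g).length := by
  rw [diff_eq_filter_not]
  have h1 : (liveOf m n g).filter (fun x => decide (x ∈ lowOf m n g)) = lowOf m n g := by
    conv_rhs => rw [lowOf]
    apply List.filter_congr
    intro x hx
    simp [lowOf, List.mem_filter, hx]
  have h2 := List.length_eq_length_filter_add (l := liveOf m n g)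
    (fun x => decide (x ∈ lowOf m n g))
  rw [h1] at h2
  have h3 : ((liveOf m n g).filter (fun x => ¬ x ∈ lowOf m n g)).length
      = ((liveOf m n g).filter (fun x => !(decide (x ∈ lowOf m n g)))).length := by
    congr 1
    apply List.filter_congr
    intro x _
    simp
  omega

-- A's loop returns count + |live| - |core|
lemma loopA_core (m n : Int) (fuel : Nat) :
    ∀ (g : List (List Char)) (cnt : Int), Shape m n g →
      (liveOf m n g).length < fuel →
      ∃ F, IsCore (liveOf m n g) F ∧
        loopA fuel m n g cnt = cnt + ((liveOf m n g).length : Int) - (F.length : Int) := by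
  induction fuel with
  | zero => intro g cnt _ h; omega
  | succ f ih =>
    intro g cnt hs hfuel
    simp only [loopA, countAccessible_eq m n g, stackOf_eq_lowOf m n g]
    by_cases hlow : lowOf m n g = []
    · refine ⟨liveOf m n g, ⟨nodup_liveOf m n g, ?_, fun _ h => h, fun G _ hsub => hsub⟩, ?_⟩
      · intro p hp
        by_contra hlt
        have : p ∈ lowOf m n g := (mem_lowOf_iff m n g p).mpr ⟨hp, by omega⟩
        simp [hlow] at this
      · simp [hlow]
    · have h1 : ¬ (((lowOf m n g).length : Int) = 0) := by
        simp [List.length_eq_zero_iff, hlow]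
      rw [if_neg h1]
      have hs' := removeStack_shape m n g (lowOf m n g) hs (mem_lowOf_InR m n g)
      have hlive' := liveOf_removeStack m n g hs
      have hlen' : (liveOf m n (removeStack g (lowOf m n g))).length
          = (liveOf m n g).length - (lowOf m n g).length := by
        rw [hlive', length_diff_lowOf]
      have hlowpos : 0 < (lowOf m n g).length := List.length_pos_iff.mpr hlow
      have hlowle : (lowOf m n g).length ≤ (liveOf m n g).length := by
        have hsub : List.Sublist (lowOf m n g) (liveOf m n g) := by
          rw [lowOf]; exact List.filter_sublist
        exact hsub.length_le
      obtain ⟨F, hF, hval⟩ := ih (removeStack g (lowOf m n g))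
        (cnt + ((lowOf m n g).length : Int)) hs' (by omega)
      refine ⟨F, ?_, ?_⟩
      · obtain ⟨hFn, hFc, hFs, hFm⟩ := hF
        refine ⟨hFn, hFc, ?_, ?_⟩
        · intro x hx
          have := hFs hx
          rw [hlive', diff_eq_filter_not, List.mem_filter] at this
          exact this.1
        · intro G hGc hGs
          refine hFm G hGc ?_
          intro x hx
          rw [hlive', diff_eq_filter_not, List.mem_filter]
          refine ⟨hGs hx, ?_⟩
          simp only [decide_eq_true_eq]
          intro hxc
          have hxlow := (mem_lowOf_iff m n g x).mp hxc
          exact closed_not_low G (liveOf m n g) hGc hGs x hxlow.2 hx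
      · rw [hval, hlen']
        push_cast [Nat.cast_sub hlowle]
        ring

-- B's loop returns removed + |live| - |core|
lemma loopB_core (fuel : Nat) :
    ∀ (live work : List (Int × Int)) (removed : Int),
      live.Nodup →
      (∀ p ∈ live, (nbrCount live p : Int) < 4 → p ∈ work) →
      work.length + 9 * live.length < fuel →
      ∃ F, IsCore live F ∧
        loopB fuel live work removed = removed + (live.length : Int) - (F.length : Int) := by
  induction fuel with
  | zero => intro live work removed _ _ h; omega
  | succ f ih =>
    intro live work removed hnd hcomp hfuel
    cases hw : work.getLast? with
    | none =>
      have hwork : work = [] := List.getLast?_eq_none_iff.mp hw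
      refine ⟨live, ⟨hnd, ?_, fun _ h => h, fun G _ hsub => hsub⟩, ?_⟩
      · intro p hp
        by_contra hlt
        have := hcomp p hp (by omega)
        simp [hwork] at this
      · simp [loopB, hw]
    | some p =>
      have hsplit : work.dropLast ++ [p] = work :=
        List.dropLast_append_getLast? p (by rw [hw]; rfl)
      have hmemw : ∀ q, q ∈ work → q ∈ work.dropLast ∨ q = p := by
        intro q hq
        rw [← hsplit] at hq
        rcases List.mem_append.mp hq with h | h
        · exact Or.inl h
        · simp at h; exact Or.inr h
      have hlenw : work.dropLast.length + 1 = work.length := by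
        rw [← hsplit]; simp
      simp only [loopB, hw]
      by_cases hpl : PySem.Set.contains live p
      · have hpmem : p ∈ live := by
          simpa [PySem.Set.contains, List.contains_eq_mem] using hpl
        rw [if_neg (not_not_intro hpl)]
        by_cases hdeg : (((nbrsB p.1 p.2).countP
            (fun q => PySem.Set.contains live q) : Nat) : Int) < 4
        · rw [if_pos hdeg]
          have hdeg' : (nbrCount live p : Int) < 4 := hdeg
          set live' := PySem.Set.discard live p with hlive'
          have hnd' : live'.Nodup := PySem.Set.nodup_discard live p hnd
          have hmem' : ∀ x, x ∈ live' ↔ x ∈ live ∧ x ≠ p := by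
            intro x; exact PySem.Set.mem_discard ..
          have hlen' : live'.length + 1 = live.length := by
            have hcnt : live.count p = 1 := by
              have h1 := List.nodup_iff_count_le_one.mp hnd p
              have h2 : 0 < live.count p := List.count_pos_iff.mpr hpmem
              omega
            have hsp := List.length_eq_length_filter_add (l := live) (fun y => !(y == p))
            have he : ((live.filter (fun y => !(!(y == p)))).length)
                = (live.filter (fun y => (y == p))).length := by
              congr 1
              apply List.filter_congr
              intro x _
              simp
            have hc2 : (live.filter (fun y => (y == p))).length = live.count p := by
              rw [← List.countP_eq_length_filter]
              rfl
            have hd : live'.length = (live.filter (fun y => !(y == p))).length := rfl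
            omega
          have hcomp' : ∀ q ∈ live',
              (nbrCount live' q : Int) < 4 →
              q ∈ work.dropLast ++
                (nbrsB p.1 p.2).filter (fun q => PySem.Set.contains live' q) := by
            intro q hq hql
            have hqlive : q ∈ live := ((hmem' q).mp hq).1
            have hqp : q ≠ p := ((hmem' q).mp hq).2
            by_cases hold : (nbrCount live q : Int) < 4
            · have := hcomp q hqlive hold
              rcases hmemw q this with h | h
              · exact List.mem_append.mpr (Or.inl h)
              · exact absurd h hqp
            · -- q's count dropped: p must be a neighbour of q, hence q a neighbour of p
              have hchg : nbrCount live' q ≠ nbrCount live q := by omega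
              have hpn : p ∈ nbrsB q.1 q.2 := by
                by_contra hpn
                exact hchg (nbrCount_discard_of_not_nbr live p q hpn)
              have hqn : q ∈ nbrsB p.1 p.2 := (nbrsB_symm q p).mp hpn
              refine List.mem_append.mpr (Or.inr ?_)
              refine List.mem_filter.mpr ⟨hqn, ?_⟩
              simp [PySem.Set.contains, List.contains_eq_mem, hq]
          have hfl : ((nbrsB p.1 p.2).filter
              (fun q => PySem.Set.contains live' q)).length ≤ 8 := by
            calc _ ≤ (nbrsB p.1 p.2).length := List.length_filter_le _ _
              _ = 8 := length_nbrsB p.1 p.2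
          obtain ⟨F, hF, hval⟩ := ih live'
            (work.dropLast ++ (nbrsB p.1 p.2).filter (fun q => PySem.Set.contains live' q))
            (removed + 1) hnd' hcomp' (by simp only [List.length_append]; omega)
          refine ⟨F, ?_, ?_⟩
          · obtain ⟨hFn, hFc, hFs, hFm⟩ := hF
            refine ⟨hFn, hFc, ?_, ?_⟩
            · intro x hx
              exact ((hmem' x).mp (hFs hx)).1
            · intro G hGc hGs
              refine hFm G hGc ?_
              intro x hx
              refine (hmem' x).mpr ⟨hGs hx, ?_⟩
              intro hxp
              exact closed_not_low G live hGc hGs p hdeg' (hxp ▸ hx)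
          · rw [hval]
            have : (live'.length : Int) = (live.length : Int) - 1 := by omega
            rw [this]; ring
        · rw [if_neg hdeg]
          have hcomp' : ∀ q ∈ live, (nbrCount live q : Int) < 4 → q ∈ work.dropLast := by
            intro q hq hql
            rcases hmemw q (hcomp q hq hql) with h | h
            · exact h
            · subst h
              exact absurd hql hdeg
          exact ih live work.dropLast removed hnd hcomp' (by omega)
      · rw [if_pos hpl]
        have hcomp' : ∀ q ∈ live, (nbrCount live q : Int) < 4 → q ∈ work.dropLast := by
          intro q hq hql
          rcases hmemw q (hcomp q hq hql) with h | h
          · exact h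
          · subst h
            exact absurd (by simpa [PySem.Set.contains, List.contains_eq_mem] using hq) hpl
        exact ih live work.dropLast removed hnd hcomp' (by omega)

-- ===== VERDICT (by name: the statement is the Claim_ definition above) =====
theorem part2_spec : Claim_equal_part2 := by
  unfold Claim_equal_part2
  intro data _ pre
  obtain ⟨hne, hlenpre⟩ := pre
  simp only [Spec_part2, part2, part2_alt]
  obtain ⟨hd, tl, hcons⟩ : ∃ hd tl, cleanLines data = hd :: tl := by
    cases h : cleanLines data with
    | nil => exact absurd h hne
    | cons a b => exact ⟨a, b, rfl⟩
  have h0 : PySem.List.pyGetD (cleanLines data) 0 [] = hd := by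
    rw [hcons]; exact PySem.List.pyGetD_zero_cons ..
  rw [h0]
  set m : Int := PySem.List.len (cleanLines data) with hm
  set n : Int := PySem.List.len hd with hn
  have hshape : Shape m n (cleanLines data) := by
    refine ⟨rfl, by simp [hn, PySem.List.len_eq], ?_⟩
    intro row hrow
    have h := hlenpre row hrow
    rw [hcons] at h
    simp only [List.headD_cons] at h
    simpa [hn, PySem.List.len_eq] using h
  have hcells : (PySem.List.enumerate (cleanLines data)).flatMap (fun rl =>
      ((PySem.List.pyRange 0 n 1).filter
          (fun c => decide (PySem.List.pyGetD rl.2 c '.' = '@'))).map (fun c => (rl.1, c)))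
      = liveOf m n (cleanLines data) := by
    rw [PySem.List.enumerate_eq_map_pyRange (cleanLines data) ([] : List Char),
      List.flatMap_map]
    simp only [liveOf, charAt]
    rfl
  rw [hcells]
  have hnodup := nodup_liveOf m n (cleanLines data)
  have hof : PySem.Set.ofList (liveOf m n (cleanLines data)) = liveOf m n (cleanLines data) :=
    PySem.Set.ofList_eq_self_of_nodup _ hnodup
  rw [hof]
  have hbnd := liveOf_length_le m n (cleanLines data)
  rw [PySem.List.length_pyRange_one] at hbnd
  have e1 : (m - 0).toNat = (cleanLines data).length := by
    simp [hm, PySem.List.len]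
  have e2 : n.toNat = hd.length := by
    simp [hn, PySem.List.len]
  rw [e1, e2] at hbnd
  obtain ⟨F1, hF1, hv1⟩ := loopA_core m n ((cleanLines data).length * hd.length + 1)
    (cleanLines data) 0 hshape (by omega)
  obtain ⟨F2, hF2, hv2⟩ := loopB_core
    ((liveOf m n (cleanLines data)).length + 9 * (liveOf m n (cleanLines data)).length + 1)
    (liveOf m n (cleanLines data)) (liveOf m n (cleanLines data)) 0 hnodup
    (fun p hp _ => hp) (by omega)
  rw [hv1, hv2, core_len_unique _ _ _ hF1 hF2]
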